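-- pv_equiv track=rewrite | github.com/jihyuunn/Programmers | level3/_Programmers3-4.py | solution
-- ===== SOURCE A (Python) =====
-- from collections import deque
--
-- def solution(n, edge):
--     vertex = {}
--     check = [0]*(n+1)
--     for node in edge:
--         x, y = node
--         if x in vertex:
--             vertex[x].append(y)
--         else:
--             vertex[x] = [y]
--         if y in vertex:
--             vertex[y].append(x)
--         else:
--             vertex[y] = [x]
--     d = deque()
--     d.append(1)
--     check[1] = 1
--     bfs(check, vertex, d)
--     distance = max(check)
--     return check.count(distance)
--
-- def bfs(check, vertex, d):
--     while d:
--         temp = d.popleft()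
--         for i in vertex[temp]:
--             if check[i] == 0:
--                 check[i] = check[temp]+1
--                 d.append(i)
-- ===== SOURCE B (Python) =====
-- def solution(n, edge):
--     adj = {}
--     for x, y in edge:
--         adj.setdefault(x, []).append(y)
--         adj.setdefault(y, []).append(x)
--     vis = [False] * (n + 1)
--     vis[1] = True
--     cur = [1]
--     while True:
--         nxt = []
--         for v in cur:
--             for w in adj.get(v, []):
--                 if not vis[w]:
--                     vis[w] = True
--                     nxt.append(w)
--         if not nxt:
--             return len(cur)
--         cur = nxt
-- ===== Notes on version B (the rewrite author's own statement) =====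
-- stated objective: alternative
-- what changed: Replaces A's deque-driven BFS with a distance array plus a final max/count scan by a level-synchronous BFS over whole frontiers with a boolean visited array, returning the size of the last non-empty wave directly.
-- outside the precondition, e.g. on solution(3, [[2, -1], [-2, 4], [1, -4]]): A returns 1, B returns 1
import Mathlib
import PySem

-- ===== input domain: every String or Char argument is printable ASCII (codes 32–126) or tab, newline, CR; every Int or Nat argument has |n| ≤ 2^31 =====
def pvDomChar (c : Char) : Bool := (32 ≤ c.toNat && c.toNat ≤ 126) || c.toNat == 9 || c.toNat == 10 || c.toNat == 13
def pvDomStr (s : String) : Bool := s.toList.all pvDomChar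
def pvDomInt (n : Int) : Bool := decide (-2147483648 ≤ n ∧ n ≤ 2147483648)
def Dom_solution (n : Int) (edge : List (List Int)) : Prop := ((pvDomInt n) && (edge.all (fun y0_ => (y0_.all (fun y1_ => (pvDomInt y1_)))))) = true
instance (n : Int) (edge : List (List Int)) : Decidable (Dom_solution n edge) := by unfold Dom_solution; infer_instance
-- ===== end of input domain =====

-- B re-implements A's queue BFS + distance array + final max/count scan as a level-synchronous
-- BFS returning the size of the last non-empty frontier (objective: alternative decomposition).

-- ===== PORT A =====
-- build the adjacency dict exactly as A's for-loop does ('x, y = node' raises unless the node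
-- has exactly 2 items; Pre_ excludes malformed nodes, the port skips them)
def pvBuildA : List (List Int) → PySem.Dict Int (List Int) → PySem.Dict Int (List Int)
  | [], vertex => vertex
  | node :: rest, vertex =>
      match node with
      | [x, y] =>
          let vertex := if vertex.contains x then vertex.modify x [] (fun l => l ++ [y]) else vertex.insert x [y]
          let vertex := if vertex.contains y then vertex.modify y [] (fun l => l ++ [x]) else vertex.insert y [x]
          pvBuildA rest vertex
      | _ => pvBuildA rest vertex

-- the body of A's inner 'for i in vertex[temp]' loop; 'vertex[temp]' raises KeyError when temp is
-- no key — under Pre_ every popped node is a key, so getD's default is never taken; likewise the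
-- index accesses check[i]/check[temp] raise outside Pre_, where the defaults make the port skip
def pvVisitA (vertex : PySem.Dict Int (List Int)) (temp : Int) (check : List Int) : List Int × List Int :=
  (vertex.getD temp []).foldl
    (fun s i =>
      if PySem.List.pyGetD s.1 i 1 == 0 then
        (PySem.List.pySetD s.1 i (PySem.List.pyGetD s.1 temp 0 + 1), s.2 ++ [i])
      else s)
    (check, [])

-- A's 'while d' loop; the Nat argument is a fuel guard that only makes the recursion structural —
-- under Pre_ the queue empties before the fuel does (proved below)
def pvBfsA (vertex : PySem.Dict Int (List Int)) : Nat → List Int → List Int → List Int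
  | 0, check, _ => check
  | _ + 1, check, [] => check
  | fuel + 1, check, temp :: rest =>
      let s := pvVisitA vertex temp check
      pvBfsA vertex fuel s.1 (rest ++ s.2)

def solution (n : Int) (edge : List (List Int)) : Int :=
  let vertex := pvBuildA edge PySem.Dict.empty
  let check : List Int := List.replicate (n + 1).toNat 0
  let check := PySem.List.pySetD check 1 1              -- check[1] = 1 (IndexError unless n ≥ 1; Pre_)
  let check := pvBfsA vertex (check.length + 2) check [1]
  let distance := (PySem.List.max? check id).getD 0     -- max(check); check ≠ [] under Pre_
  ((PySem.List.count check distance : Nat) : Int)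

-- ===== PORT B =====
-- body of B's 'for w in adj.get(v, [])' loop: mark unvisited neighbours, growing the next frontier
-- (vis[w] raises outside Pre_, where the default makes the port skip)
def pvVisitB (adj : PySem.Dict Int (List Int)) (s : List Bool × List Int) (v : Int) : List Bool × List Int :=
  (adj.getD v []).foldl
    (fun s w =>
      if PySem.List.pyGetD s.1 w true == false then
        (PySem.List.pySetD s.1 w true, s.2 ++ [w])
      else s)
    s

-- B's 'while True' wave loop; Nat fuel guard only (under Pre_ the waves run out first, proved below)
def pvLevelB (adj : PySem.Dict Int (List Int)) : Nat → List Bool → List Int → Int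
  | 0, _, cur => PySem.List.len cur
  | fuel + 1, vis, cur =>
      let s := cur.foldl (pvVisitB adj) (vis, [])
      if s.2.isEmpty then PySem.List.len cur else pvLevelB adj fuel s.1 s.2

def solution_alt (n : Int) (edge : List (List Int)) : Int :=
  let adj := edge.foldl
    (fun adj node =>
      match node with
      | [x, y] =>
          let adj := (adj.setdefault x []).modify x [] (fun l => l ++ [y])
          (adj.setdefault y []).modify y [] (fun l => l ++ [x])
      | _ => adj)
    PySem.Dict.empty
  let vis : List Bool := List.replicate (n + 1).toNat false
  let vis := PySem.List.pySetD vis 1 true               -- vis[1] = True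
  pvLevelB adj (vis.length + 1) vis [1]

-- ===== PRECONDITION & SPEC =====
-- Pre_ = n ≥ 1, every edge a 2-list of valid indices into the length-(n+1) array, and node 1 an
-- endpoint.  Outside it A raises (IndexError/ValueError/KeyError) — except that an out-of-range
-- endpoint UNREACHABLE from node 1 is never indexed, so A still returns there (and B returns the
-- same value); those inputs are excluded because reachability is not a closed-form condition.
def Pre_solution (n : Int) (edge : List (List Int)) : Prop :=
  1 ≤ n ∧ (∀ node ∈ edge, node.length = 2 ∧ ∀ v ∈ node, -(n + 1) ≤ v ∧ v ≤ n) ∧ (∃ node ∈ edge, 1 ∈ node)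
instance (n : Int) (edge : List (List Int)) : Decidable (Pre_solution n edge) := by unfold Pre_solution; infer_instance
def pvWitness_solution : Int × List (List Int) := (2, [[1, 2], [2, 0]])

def Spec_solution (n : Int) (edge : List (List Int)) (out : Int) : Prop := out = solution_alt n edge
instance (n : Int) (edge : List (List Int)) (out : Int) : Decidable (Spec_solution n edge out) := by unfold Spec_solution; infer_instance

-- ===== CLAIM (what is proved, stated in full; the proofs are below) =====
def Claim_equal_solution : Prop := ∀ (n : Int) (edge : List (List Int)), Dom_solution n edge → Pre_solution n edge → Spec_solution n edge (solution n edge)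

-- ===== LEMMAS AND PROOFS =====

-- the A-state/B-state correspondence: same length, and a cell is visited iff its distance is non-zero
def pvCorr (c : List Int) (vis : List Bool) : Prop :=
  c.length = vis.length ∧ ∀ j : Nat, (vis.getD j false = true ↔ c.getD j 0 ≠ 0)

-- normalisation of the Python index helpers
theorem pvIdx_lt {len : Nat} {i : Int} {j : Nat} (h : PySem.List.pyIdx? len i = some j) : j < len := by
  unfold PySem.List.pyIdx? at h
  split_ifs at h with h1 h2 h3 <;> simp_all <;> omega

theorem pvGetD_some {α : Type} {xs : List α} {i : Int} {j : Nat} (d : α)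
    (h : PySem.List.pyIdx? xs.length i = some j) : PySem.List.pyGetD xs i d = xs.getD j d := by
  simp [PySem.List.pyGetD, PySem.List.pyGet?, h, List.getD_eq_getElem?_getD]

theorem pvSetD_some {α : Type} {xs : List α} {i : Int} {j : Nat} (v : α)
    (h : PySem.List.pyIdx? xs.length i = some j) : PySem.List.pySetD xs i v = xs.set j v := by
  simp [PySem.List.pySetD, PySem.List.pySet?, h]

theorem pvGetD_none {α : Type} {xs : List α} {i : Int} (d : α)
    (h : PySem.List.pyIdx? xs.length i = none) : PySem.List.pyGetD xs i d = d := by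
  simp [PySem.List.pyGetD, PySem.List.pyGet?, h]

-- the loop bodies of pvVisitA / pvVisitB, named for the proofs
def pvStepA (temp : Int) : (List Int × List Int) → Int → (List Int × List Int) :=
  fun s i =>
    if PySem.List.pyGetD s.1 i 1 == 0 then
      (PySem.List.pySetD s.1 i (PySem.List.pyGetD s.1 temp 0 + 1), s.2 ++ [i])
    else s

def pvStepB : (List Bool × List Int) → Int → (List Bool × List Int) :=
  fun s w =>
    if PySem.List.pyGetD s.1 w true == false then
      (PySem.List.pySetD s.1 w true, s.2 ++ [w])
    else s

-- one whole queue-pop of A, acting on (check, pending-new-queue-entries)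
def pvStepOutA (V : PySem.Dict Int (List Int)) (s : List Int × List Int) (t : Int) : List Int × List Int :=
  ((pvVisitA V t s.1).1, s.2 ++ (pvVisitA V t s.1).2)

theorem pvVisitA_eq (V : PySem.Dict Int (List Int)) (t : Int) (c : List Int) :
    pvVisitA V t c = (V.getD t []).foldl (pvStepA t) (c, []) := rfl

theorem pvVisitB_eq (V : PySem.Dict Int (List Int)) (s : List Bool × List Int) (v : Int) :
    pvVisitB V s v = (V.getD v []).foldl pvStepB s := rfl

-- counting after writing v into a zero cell
theorem pvCountSet {cs : List Int} {j : Nat} (hj : j < cs.length) (hc : cs.getD j 0 = 0) {v : Int} (hv : v ≠ 0) :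
    List.count v (cs.set j v) = List.count v cs + 1 ∧ List.count 0 cs = List.count 0 (cs.set j v) + 1 := by
  have hcj : cs[j] = 0 := by
    rw [List.getD_eq_getElem?_getD, List.getElem?_eq_getElem hj] at hc; simpa using hc
  have hdec : cs = cs.take j ++ cs[j] :: cs.drop (j+1) := by
    rw [List.getElem_cons_drop, List.take_append_drop]
  have hset : cs.set j v = cs.take j ++ v :: cs.drop (j+1) := by
    rw [List.set_eq_take_append_cons_drop]; simp [hj]
  constructor
  · rw [hset]; conv_rhs => rw [hdec]
    simp [List.count_append, hcj, Ne.symm hv]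
    omega
  · rw [hset]; conv_lhs => rw [hdec]
    simp [List.count_append, hcj, hv]
    omega

-- getD below the length ignores the default, and getD after set
theorem pvGetD_eq {α : Type} {xs : List α} {j : Nat} (h : j < xs.length) (d d' : α) :
    xs.getD j d = xs.getD j d' := by
  simp [List.getD_eq_getElem?_getD, List.getElem?_eq_getElem h]

theorem pvGetDSet {α : Type} {xs : List α} {j : Nat} (h : j < xs.length) (v : α) (k : Nat) (d : α) :
    (xs.set j v).getD k d = if k = j then v else xs.getD k d := by
  by_cases hk : k = j
  · subst hk; simp [List.getD_eq_getElem?_getD, List.getElem?_set_self, h]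
  · simp [List.getD_eq_getElem?_getD, List.getElem?_set_ne (fun hh => hk hh.symm), hk]

-- the synchronised inner loops: A's neighbour scan of one popped node and B's scan of one frontier
-- node discover the SAME new nodes and keep the two states corresponding
theorem pvInnerFold (t : Int) (ℓ : Nat) :
    ∀ (ws : List Int) (c : List Int) (vis : List Bool), pvCorr c vis →
    (∀ x ∈ c, 0 ≤ x ∧ x ≤ (ℓ : Int) + 2) →
    PySem.List.pyGetD c t 0 = (ℓ : Int) + 1 →
    ∃ c' vis' Δ,
      (∀ nw : List Int, ws.foldl (pvStepA t) (c, nw) = (c', nw ++ Δ)) ∧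
      (∀ nx : List Int, ws.foldl pvStepB (vis, nx) = (vis', nx ++ Δ)) ∧
      pvCorr c' vis' ∧
      (∀ x ∈ c', 0 ≤ x ∧ x ≤ (ℓ : Int) + 2) ∧
      (∀ i : Int, PySem.List.pyGetD c i 0 ≠ 0 → PySem.List.pyGetD c' i 0 = PySem.List.pyGetD c i 0) ∧
      (∀ w ∈ Δ, PySem.List.pyGetD c' w 0 = (ℓ : Int) + 2) ∧
      List.count ((ℓ : Int) + 2) c' = List.count ((ℓ : Int) + 2) c + Δ.length ∧
      List.count 0 c = List.count 0 c' + Δ.length ∧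
      (Δ = [] → c' = c ∧ vis' = vis) := by
  intro ws
  induction ws with
  | nil =>
    intro c vis hcv hb hT
    exact ⟨c, vis, [], by simp, by simp, hcv, hb, fun i _ => rfl, by simp, by simp, by simp,
      fun _ => ⟨rfl, rfl⟩⟩
  | cons w ws ih =>
    intro c vis hcv hb hT
    have hlen := hcv.1
    have hl2 : ((ℓ : Int) + 2) ≠ 0 := by omega
    cases hidx : PySem.List.pyIdx? c.length w with
    | none =>
      have hidv : PySem.List.pyIdx? vis.length w = none := by rw [← hlen]; exact hidx
      have hA0 : ∀ nw : List Int, pvStepA t (c, nw) w = (c, nw) := by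
        intro nw; simp [pvStepA, pvGetD_none 1 hidx]
      have hB0 : ∀ nx : List Int, pvStepB (vis, nx) w = (vis, nx) := by
        intro nx; simp [pvStepB, pvGetD_none true hidv]
      obtain ⟨c', vis', Δ, hA, hB, rest⟩ := ih c vis hcv hb hT
      exact ⟨c', vis', Δ, fun nw => by rw [List.foldl_cons, hA0, hA],
        fun nx => by rw [List.foldl_cons, hB0, hB], rest⟩
    | some j =>
      have hj : j < c.length := pvIdx_lt hidx
      have hjv : j < vis.length := hlen ▸ hj
      have hidv : PySem.List.pyIdx? vis.length w = some j := by rw [← hlen]; exact hidx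
      have hgc : PySem.List.pyGetD c w 1 = c.getD j 0 := by
        rw [pvGetD_some 1 hidx]; exact pvGetD_eq hj 1 0
      have hgv : PySem.List.pyGetD vis w true = vis.getD j false := by
        rw [pvGetD_some true hidv]; exact pvGetD_eq hjv true false
      by_cases hz : c.getD j 0 = 0
      · -- a new node is discovered by both sides
        have hvisj : vis.getD j false = false := by
          cases hvj : vis.getD j false with
          | false => rfl
          | true => exact absurd hz ((hcv.2 j).mp hvj)
        set c1 := c.set j ((ℓ : Int) + 2) with hc1
        set vis1 := vis.set j true with hvis1
        have hA0 : ∀ nw : List Int, pvStepA t (c, nw) w = (c1, nw ++ [w]) := by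
          intro nw
          simp only [pvStepA, hgc, hz]
          rw [if_pos (by simp), pvSetD_some _ hidx, hT]
          have harith : (ℓ : Int) + 1 + 1 = (ℓ : Int) + 2 := by ring
          rw [harith]
        have hB0 : ∀ nx : List Int, pvStepB (vis, nx) w = (vis1, nx ++ [w]) := by
          intro nx
          simp only [pvStepB, hgv, hvisj]
          rw [if_pos (by simp), pvSetD_some _ hidv]
        -- re-establish the invariants for the written states
        have hcv1 : pvCorr c1 vis1 := by
          refine ⟨by simp [hc1, hvis1, hlen], fun k => ?_⟩
          rw [hc1, hvis1, pvGetDSet hj _ k, pvGetDSet hjv _ k]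
          by_cases hk : k = j
          · simp [hk, hl2]
          · simp only [if_neg hk]; exact hcv.2 k
        have hb1 : ∀ x ∈ c1, 0 ≤ x ∧ x ≤ (ℓ : Int) + 2 := by
          intro x hx
          rcases List.mem_or_eq_of_mem_set hx with hx | rfl
          · exact hb x hx
          · omega
        have hT1 : PySem.List.pyGetD c1 t 0 = (ℓ : Int) + 1 := by
          cases hidxt : PySem.List.pyIdx? c.length t with
          | none => rw [pvGetD_none 0 hidxt] at hT; omega
          | some jt =>
            have hjt : jt < c.length := pvIdx_lt hidxt
            have hne : jt ≠ j := by
              intro hh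
              rw [pvGetD_some 0 hidxt, hh, hz] at hT; omega
            have hidxt1 : PySem.List.pyIdx? c1.length t = some jt := by
              rw [hc1, List.length_set]; exact hidxt
            rw [pvGetD_some 0 hidxt1, hc1, pvGetDSet hj _ jt, if_neg hne,
              ← pvGetD_some 0 hidxt]
            exact hT
        obtain ⟨c', vis', Δ, hA, hB, hcv', hb', hpres', hΔ', hcnt', hz', hnil'⟩ :=
          ih c1 vis1 hcv1 hb1 hT1
        have hpres1 : ∀ i : Int, PySem.List.pyGetD c i 0 ≠ 0 →
            PySem.List.pyGetD c1 i 0 = PySem.List.pyGetD c i 0 := by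
          intro i hi
          cases hidxi : PySem.List.pyIdx? c.length i with
          | none => rw [pvGetD_none 0 hidxi] at hi; omega
          | some k =>
            have hki : k ≠ j := by
              intro hh; rw [pvGetD_some 0 hidxi, hh, hz] at hi; omega
            have hidxi1 : PySem.List.pyIdx? c1.length i = some k := by
              rw [hc1, List.length_set]; exact hidxi
            rw [pvGetD_some 0 hidxi1, pvGetD_some 0 hidxi, hc1, pvGetDSet hj _ k, if_neg hki]
        have hw1 : PySem.List.pyGetD c1 w 0 = (ℓ : Int) + 2 := by
          have hidx1 : PySem.List.pyIdx? c1.length w = some j := by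
            rw [hc1, List.length_set]; exact hidx
          rw [pvGetD_some 0 hidx1, hc1, pvGetDSet hj _ j, if_pos rfl]
        obtain ⟨hcnt1, hz1⟩ := pvCountSet hj hz hl2
        refine ⟨c', vis', w :: Δ, ?_, ?_, hcv', hb', ?_, ?_, ?_, ?_, by simp⟩
        · intro nw
          rw [List.foldl_cons, hA0, hA (nw ++ [w])]
          simp
        · intro nx
          rw [List.foldl_cons, hB0, hB (nx ++ [w])]
          simp
        · intro i hi
          rw [hpres', hpres1 i hi]
          rw [hpres1 i hi]; exact hi
        · intro x hx
          rcases List.mem_cons.mp hx with rfl | hx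
          · rw [hpres' x (by rw [hw1]; omega), hw1]
          · exact hΔ' x hx
        · rw [hcnt', hc1, hcnt1]
          simp [List.length_cons]
          omega
        · rw [hz1, ← hc1, hz']
          simp [List.length_cons]
          omega
      · -- already visited on both sides
        have hvisj : vis.getD j false = true := (hcv.2 j).mpr hz
        have hbe : (c.getD j 0 == (0 : Int)) = false := beq_eq_false_iff_ne.mpr hz
        have hbv : (vis.getD j false == false) = false := by rw [hvisj]; rfl
        have hA0 : ∀ nw : List Int, pvStepA t (c, nw) w = (c, nw) := by
          intro nw; simp only [pvStepA, hgc, hbe, Bool.false_eq_true, if_false]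
        have hB0 : ∀ nx : List Int, pvStepB (vis, nx) w = (vis, nx) := by
          intro nx; simp only [pvStepB, hgv, hbv, Bool.false_eq_true, if_false]
        obtain ⟨c', vis', Δ, hA, hB, rest⟩ := ih c vis hcv hb hT
        exact ⟨c', vis', Δ, fun nw => by rw [List.foldl_cons, hA0, hA],
          fun nx => by rw [List.foldl_cons, hB0, hB], rest⟩

-- one whole BFS wave, on both sides, with the same conclusions
theorem pvWaveFold (V : PySem.Dict Int (List Int)) (ℓ : Nat) :
    ∀ (F : List Int) (c : List Int) (vis : List Bool), pvCorr c vis →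
    (∀ x ∈ c, 0 ≤ x ∧ x ≤ (ℓ : Int) + 2) →
    (∀ f ∈ F, PySem.List.pyGetD c f 0 = (ℓ : Int) + 1) →
    ∃ c' vis' N,
      (∀ a : List Int, F.foldl (pvStepOutA V) (c, a) = (c', a ++ N)) ∧
      (∀ a : List Int, F.foldl (pvVisitB V) (vis, a) = (vis', a ++ N)) ∧
      pvCorr c' vis' ∧
      (∀ x ∈ c', 0 ≤ x ∧ x ≤ (ℓ : Int) + 2) ∧
      (∀ i : Int, PySem.List.pyGetD c i 0 ≠ 0 → PySem.List.pyGetD c' i 0 = PySem.List.pyGetD c i 0) ∧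
      (∀ w ∈ N, PySem.List.pyGetD c' w 0 = (ℓ : Int) + 2) ∧
      List.count ((ℓ : Int) + 2) c' = List.count ((ℓ : Int) + 2) c + N.length ∧
      List.count 0 c = List.count 0 c' + N.length ∧
      (N = [] → c' = c ∧ vis' = vis) := by
  intro F
  induction F with
  | nil =>
    intro c vis hcv hb _
    exact ⟨c, vis, [], by simp, by simp, hcv, hb, fun i _ => rfl, by simp, by simp, by simp,
      fun _ => ⟨rfl, rfl⟩⟩
  | cons f F ih =>
    intro c vis hcv hb hF
    have hl1 : ((ℓ : Int) + 1) ≠ 0 := by omega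
    obtain ⟨c1, vis1, Δ, hA1, hB1, hcv1, hb1, hpres1, hΔ1, hcnt1, hz1, hnil1⟩ :=
      pvInnerFold f ℓ (V.getD f []) c vis hcv hb (hF f List.mem_cons_self)
    have hF1 : ∀ g ∈ F, PySem.List.pyGetD c1 g 0 = (ℓ : Int) + 1 := by
      intro g hg
      have hgv := hF g (List.mem_cons_of_mem f hg)
      rw [hpres1 g (by rw [hgv]; exact hl1), hgv]
    obtain ⟨c', vis', N, hA, hB, hcv', hb', hpres', hN', hcnt', hz', hnil'⟩ :=
      ih c1 vis1 hcv1 hb1 hF1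
    have hvisA : pvVisitA V f c = (c1, Δ) := by
      rw [pvVisitA_eq, hA1 []]; simp
    refine ⟨c', vis', Δ ++ N, ?_, ?_, hcv', hb', ?_, ?_, ?_, ?_, ?_⟩
    · intro a
      rw [List.foldl_cons]
      show List.foldl (pvStepOutA V) ((pvVisitA V f c).1, a ++ (pvVisitA V f c).2) F = _
      rw [hvisA, hA (a ++ Δ)]
      simp
    · intro a
      rw [List.foldl_cons]
      show List.foldl (pvVisitB V) (pvVisitB V (vis, a) f) F = _
      rw [pvVisitB_eq, hB1 a, hB (a ++ Δ)]
      simp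
    · intro i hi
      have h1 : PySem.List.pyGetD c1 i 0 = PySem.List.pyGetD c i 0 := hpres1 i hi
      rw [hpres' i (by rw [h1]; exact hi), h1]
    · intro w hw
      rcases List.mem_append.mp hw with hw | hw
      · have h1 := hΔ1 w hw
        rw [hpres' w (by rw [h1]; omega), h1]
      · exact hN' w hw
    · rw [hcnt', hcnt1]
      simp [List.length_append]
      omega
    · rw [hz1, hz']
      simp [List.length_append]
      omega
    · intro h
      rcases List.append_eq_nil_iff.mp h with ⟨rfl, rfl⟩
      obtain ⟨rfl, rfl⟩ := hnil1 rfl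
      exact hnil' rfl

theorem pvBfsA_nil (V : PySem.Dict Int (List Int)) (fuel : Nat) (c : List Int) :
    pvBfsA V fuel c [] = c := by
  cases fuel <;> rfl

-- draining a prefix F of A's queue is one fold of whole pops
-- the accumulator of the whole-pop fold only ever grows at the back
theorem pvOutAcc (V : PySem.Dict Int (List Int)) :
    ∀ (F : List Int) (c : List Int) (a : List Int),
    F.foldl (pvStepOutA V) (c, a)
      = ((F.foldl (pvStepOutA V) (c, [])).1, a ++ (F.foldl (pvStepOutA V) (c, [])).2) := by
  intro F
  induction F with
  | nil => simp
  | cons t F ih =>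
    intro c a
    simp only [List.foldl_cons, pvStepOutA]
    rw [ih (pvVisitA V t c).1 (a ++ (pvVisitA V t c).2),
        ih (pvVisitA V t c).1 ([] ++ (pvVisitA V t c).2)]
    simp

theorem pvDrain (V : PySem.Dict Int (List Int)) :
    ∀ (F : List Int) (fuel : Nat) (c : List Int) (rest : List Int),
    pvBfsA V (fuel + F.length) c (F ++ rest)
      = pvBfsA V fuel (F.foldl (pvStepOutA V) (c, [])).1 (rest ++ (F.foldl (pvStepOutA V) (c, [])).2) := by
  intro F
  induction F with
  | nil => intro fuel c rest; simp
  | cons t F ih =>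
    intro fuel c rest
    have h1 : fuel + (t :: F).length = (fuel + F.length) + 1 := by simp [List.length_cons]; omega
    rw [h1]
    show pvBfsA V (fuel + F.length + 1) c (t :: (F ++ rest)) = _
    simp only [pvBfsA]
    rw [List.append_assoc, ih fuel (pvVisitA V t c).1 (rest ++ (pvVisitA V t c).2)]
    conv_rhs => rw [List.foldl_cons]
    simp only [pvStepOutA]
    rw [pvOutAcc V F (pvVisitA V t c).1 ([] ++ (pvVisitA V t c).2)]
    simp [List.append_assoc]

-- max? really returns a maximal element of a non-empty list
theorem pvMaxAux :
    ∀ (xs : List Int) (a : Int),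
    ∃ m, PySem.List.max? (a :: xs) id = some m ∧ m ∈ a :: xs ∧ a ≤ m ∧ ∀ y ∈ xs, y ≤ m := by
  intro xs
  induction xs with
  | nil => intro a; exact ⟨a, by simp [PySem.List.max?], by simp, le_refl a, by simp⟩
  | cons x t ih =>
    intro a
    by_cases h : a < x
    · obtain ⟨m, hm, hmem, hle, hmax⟩ := ih x
      simp only [PySem.List.max?, List.foldl_cons] at hm ⊢
      refine ⟨m, by simpa [h] using hm, List.mem_cons_of_mem a hmem,
        le_of_lt (lt_of_lt_of_le h hle), ?_⟩
      intro y hy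
      rcases List.mem_cons.mp hy with rfl | hy
      · exact hle
      · exact hmax y hy
    · obtain ⟨m, hm, hmem, hle, hmax⟩ := ih a
      simp only [PySem.List.max?, List.foldl_cons] at hm ⊢
      refine ⟨m, by simpa [h] using hm, ?_, hle, ?_⟩
      · rcases List.mem_cons.mp hmem with rfl | h1
        · exact List.mem_cons_self
        · exact List.mem_cons_of_mem _ (List.mem_cons_of_mem _ h1)
      · intro y hy
        rcases List.mem_cons.mp hy with rfl | hy
        · omega
        · exact hmax y hy

-- the heart: from corresponding states, A's finished BFS followed by the max/count scan returns
-- exactly what B's remaining wave loop returns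
theorem pvMain (V : PySem.Dict Int (List Int)) :
    ∀ (fuelB fuelA : Nat) (c : List Int) (vis : List Bool) (F : List Int) (ℓ : Nat),
    pvCorr c vis →
    (∀ x ∈ c, 0 ≤ x ∧ x ≤ (ℓ : Int) + 1) →
    (∀ f ∈ F, PySem.List.pyGetD c f 0 = (ℓ : Int) + 1) →
    F ≠ [] →
    List.count ((ℓ : Int) + 1) c = F.length →
    List.count 0 c + F.length ≤ fuelA →
    List.count 0 c + 1 ≤ fuelB →
    ((PySem.List.count (pvBfsA V fuelA c F) ((PySem.List.max? (pvBfsA V fuelA c F) id).getD 0) : Nat) : Int)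
      = pvLevelB V fuelB vis F := by
  intro fuelB
  induction fuelB with
  | zero => intro fuelA c vis F ℓ _ _ _ _ _ _ hfB; omega
  | succ fb ih =>
    intro fuelA c vis F ℓ hcv hb hF hFne hcount hfA hfB
    obtain ⟨c', vis', N, hA, hB, hcv', hb', hpres', hN', hcnt', hz', hnil'⟩ :=
      pvWaveFold V ℓ F c vis hcv
        (fun x hx => ⟨(hb x hx).1, by have := (hb x hx).2; omega⟩) hF
    have hfa : fuelA = (fuelA - F.length) + F.length := by
      have : F.length ≤ fuelA := le_trans (by omega) hfA
      omega
    have hdrain : pvBfsA V fuelA c F = pvBfsA V (fuelA - F.length) c' N := by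
      have h0 : pvBfsA V fuelA c F = pvBfsA V ((fuelA - F.length) + F.length) c (F ++ []) := by
        rw [← hfa, List.append_nil]
      rw [h0, pvDrain V F (fuelA - F.length) c [], hA []]
      simp
    have hlev : pvLevelB V (fb + 1) vis F
        = if N.isEmpty then PySem.List.len F else pvLevelB V fb vis' N := by
      show (let s := F.foldl (pvVisitB V) (vis, []);
        if s.2.isEmpty then PySem.List.len F else pvLevelB V fb s.1 s.2) = _
      rw [hB []]
      simp
    by_cases hNnil : N = []
    · subst hNnil
      obtain ⟨rfl, rfl⟩ := hnil' rfl
      rw [hdrain, pvBfsA_nil, hlev]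
      simp only [List.isEmpty_nil, if_true]
      -- A's final scan: the maximum of check is ℓ+1 and it occurs F.length times
      obtain ⟨f, hf⟩ := List.exists_mem_of_ne_nil F hFne
      have hfv := hF f hf
      have hl1 : ((ℓ : Int) + 1) ≠ 0 := by omega
      have hmem : (ℓ : Int) + 1 ∈ c' := by
        cases hidx : PySem.List.pyIdx? c'.length f with
        | none => rw [pvGetD_none 0 hidx] at hfv; omega
        | some j =>
          have hj := pvIdx_lt hidx
          rw [pvGetD_some 0 hidx] at hfv
          rw [← hfv, List.getD_eq_getElem?_getD, List.getElem?_eq_getElem hj]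
          exact List.getElem_mem hj
      rcases hc : c' with _ | ⟨x, cs⟩
      · rw [hc] at hmem; simp at hmem
      · rw [← hc]
        have hmax : ∃ m, PySem.List.max? c' id = some m ∧ m ∈ c' ∧ ∀ y ∈ c', y ≤ m := by
          obtain ⟨m, hm, hmm, hle, hmx⟩ := pvMaxAux cs x
          refine ⟨m, by rw [hc]; exact hm, by rw [hc]; exact hmm, ?_⟩
          intro y hy
          rw [hc] at hy
          rcases List.mem_cons.mp hy with rfl | hy
          · exact hle
          · exact hmx y hy
        obtain ⟨m, hm, hmm, hmx⟩ := hmax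
        have hmval : m = (ℓ : Int) + 1 :=
          le_antisymm ((hb m hmm).2) (hmx _ hmem)
        rw [hm]
        simp only [Option.getD_some, PySem.List.count, hmval, PySem.List.len]
        rw [hcount]
    · rw [hdrain, hlev, if_neg (by simpa [List.isEmpty_iff] using hNnil)]
      have hcast : ((ℓ + 1 : Nat) : Int) = (ℓ : Int) + 1 := by push_cast; ring
      have hzero : List.count ((ℓ : Int) + 2) c = 0 := by
        rw [List.count_eq_zero]
        intro hmem
        have := (hb _ hmem).2
        omega
      have hNlen : 1 ≤ N.length := by
        rcases N with _ | _
        · exact absurd rfl hNnil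
        · simp
      apply ih (fuelA - F.length) c' vis' N (ℓ + 1)
      · exact hcv'
      · intro x hx
        have := hb' x hx
        rw [hcast]
        omega
      · intro g hg
        rw [hcast]
        have : ((ℓ : Int) + 1) + 1 = (ℓ : Int) + 2 := by ring
        rw [this]
        exact hN' g hg
      · exact hNnil
      · rw [hcast, show ((ℓ : Int) + 1) + 1 = (ℓ : Int) + 2 from by ring, hcnt', hzero]
        simp
      · omega
      · omega

-- the two adjacency-building loops produce the same dict
theorem pvStepDict (d : PySem.Dict Int (List Int)) (x y : Int) :
    (d.setdefault x []).modify x [] (fun l => l ++ [y])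
      = if d.contains x then d.modify x [] (fun l => l ++ [y]) else d.insert x [y] := by
  by_cases h : d.contains x
  · rw [if_pos h, PySem.Dict.setdefault_of_contains _ _ h]
  · rw [if_neg (by simp [h]), PySem.Dict.setdefault_of_not_contains _ _ (by simp [h])]
    simp [PySem.Dict.modify, PySem.Dict.getD_insert_self, PySem.Dict.insert_insert_self]

theorem pvBuildEq :
    ∀ (edge : List (List Int)) (d : PySem.Dict Int (List Int)),
    pvBuildA edge d = edge.foldl
      (fun adj node =>
        match node with
        | [x, y] =>
            let adj := (adj.setdefault x []).modify x [] (fun l => l ++ [y])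
            (adj.setdefault y []).modify y [] (fun l => l ++ [x])
        | _ => adj)
      d := by
  intro edge
  induction edge with
  | nil => intro d; rfl
  | cons node rest ih =>
    intro d
    rcases node with _ | ⟨x, _ | ⟨y, _ | ⟨z, zs⟩⟩⟩
    · simpa only [pvBuildA, List.foldl_cons] using ih d
    · simpa only [pvBuildA, List.foldl_cons] using ih d
    · simp only [pvBuildA, List.foldl_cons]
      rw [← pvStepDict d x y, ← pvStepDict _ y x]
      exact ih _
    · simpa only [pvBuildA, List.foldl_cons] using ih d

-- the top-level assembly: from the freshly initialised arrays the two loops agree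
theorem pvTop (V : PySem.Dict Int (List Int)) (k : Nat) :
    ((PySem.List.count
        (pvBfsA V ((PySem.List.pySetD (List.replicate (k + 2) (0 : Int)) 1 1).length + 2)
          (PySem.List.pySetD (List.replicate (k + 2) (0 : Int)) 1 1) [1])
        ((PySem.List.max?
          (pvBfsA V ((PySem.List.pySetD (List.replicate (k + 2) (0 : Int)) 1 1).length + 2)
            (PySem.List.pySetD (List.replicate (k + 2) (0 : Int)) 1 1) [1]) id).getD 0) : Nat) : Int)
      = pvLevelB V ((PySem.List.pySetD (List.replicate (k + 2) false) 1 true).length + 1)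
          (PySem.List.pySetD (List.replicate (k + 2) false) 1 true) [1] := by
  have hidxc : PySem.List.pyIdx? (List.replicate (k + 2) (0 : Int)).length 1 = some 1 := by
    rw [PySem.List.pyIdx?, if_pos (by omega), if_pos (by rw [List.length_replicate]; push_cast; omega)]
    simp
  have hidxv : PySem.List.pyIdx? (List.replicate (k + 2) false).length 1 = some 1 := by
    rw [PySem.List.pyIdx?, if_pos (by omega), if_pos (by rw [List.length_replicate]; push_cast; omega)]
    simp
  have hc0 : PySem.List.pySetD (List.replicate (k + 2) (0 : Int)) 1 1
      = 0 :: 1 :: List.replicate k 0 := by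
    rw [pvSetD_some _ hidxc, show k + 2 = (k + 1) + 1 from rfl, List.replicate_succ,
      List.replicate_succ]
    rfl
  have hv0 : PySem.List.pySetD (List.replicate (k + 2) false) 1 true
      = false :: true :: List.replicate k false := by
    rw [pvSetD_some _ hidxv, show k + 2 = (k + 1) + 1 from rfl, List.replicate_succ,
      List.replicate_succ]
    rfl
  rw [hc0, hv0]
  have hlc : (0 :: 1 :: List.replicate k (0 : Int)).length + 2 = (k + 2) + 2 := by simp
  have hlv : (false :: true :: List.replicate k false).length + 1 = (k + 2) + 1 := by simp
  rw [hlc, hlv]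
  have hcorr : pvCorr (0 :: 1 :: List.replicate k (0 : Int)) (false :: true :: List.replicate k false) := by
    refine ⟨by simp, fun j => ?_⟩
    rcases j with _ | _ | j
    · simp
    · simp
    · by_cases hj : j < k <;>
        simp [List.getD_eq_getElem?_getD, List.getElem?_replicate, hj]
  have hidx1 : PySem.List.pyIdx? (0 :: 1 :: List.replicate k (0 : Int)).length 1 = some 1 := by
    rw [PySem.List.pyIdx?, if_pos (by omega),
      if_pos (by simp only [List.length_cons, List.length_replicate]; push_cast; omega)]
    simp
  refine pvMain V ((k + 2) + 1) ((k + 2) + 2) _ _ [1] 0 hcorr ?_ ?_ (by simp) ?_ ?_ ?_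
  · intro x hx
    simp only [List.mem_cons, List.mem_replicate] at hx
    rcases hx with rfl | rfl | ⟨-, rfl⟩ <;> simp
  · intro f hf
    rcases List.mem_cons.mp hf with rfl | hf
    · rw [pvGetD_some 0 hidx1]
      simp
    · simp at hf
  · rw [show ((0 : Nat) : Int) + 1 = 1 by simp]
    simp [List.count_cons, List.count_replicate]
  · have hcz : List.count (0 : Int) (0 :: 1 :: List.replicate k 0) = k + 1 := by
      simp [List.count_cons, List.count_replicate]
    rw [hcz]
    simp only [List.length_cons, List.length_nil]
    omega
  · have hcz : List.count (0 : Int) (0 :: 1 :: List.replicate k 0) = k + 1 := by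
      simp [List.count_cons, List.count_replicate]
    rw [hcz]
    omega

theorem solution_spec : Claim_equal_solution := by
  intro n edge _ hpre
  obtain ⟨hn, -, -⟩ := hpre
  have hm2 : 2 ≤ (n + 1).toNat := by omega
  obtain ⟨k, hk⟩ : ∃ k, (n + 1).toNat = k + 2 := ⟨(n + 1).toNat - 2, by omega⟩
  unfold Spec_solution solution solution_alt
  rw [← pvBuildEq edge PySem.Dict.empty, hk]
  exact pvTop (pvBuildA edge PySem.Dict.empty) k
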